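-- pv_equiv track=rewrite | github.com/annaulazar/algorithms_practice | Trenirovka_7_0/Prefsumm_treeset/task_b.py | get_treeset
-- ===== SOURCE A (Python) =====
-- def get_treeset(array):
--     degree_two = 0
--     while 2 ** degree_two < len(array):
--         degree_two += 1
--     size = 2 ** degree_two
--     tree_set = [(-1, -1)] * (size * 2 - 1)  # (максимум, количество максимумов)
--     for i in range(len(array)):
--         tree_set[i + size - 1] = (array[i], i)
--     for j in range(size - 2, -1, -1):
--         left_child = tree_set[2 * j + 1]
--         right_child = tree_set[2 * j + 2]
--         if left_child[0] > right_child[0]: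
--             tree_set[j] = left_child
--         else:
--             tree_set[j] = right_child
--
--     return tree_set, size
-- ===== SOURCE B (Python) =====
-- def get_treeset(array):
--     degree_two = 0
--     while 2 ** degree_two < len(array):
--         degree_two += 1
--     size = 2 ** degree_two
--     tree_set = [(-1, -1)] * (size * 2 - 1)
--     for i in range(len(array)):
--         tree_set[i + size - 1] = (array[i], i)
--
--     def build(node):
--         if node >= size - 1:
--             return
--         build(2 * node + 1)
--         build(2 * node + 2)
--         left_child = tree_set[2 * node + 1]
--         right_child = tree_set[2 * node + 2]
--         tree_set[node] = left_child if left_child[0] > right_child[0] else right_child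
--
--     build(0)
--     return tree_set, size
-- ===== Notes on version B (the rewrite author's own statement) =====
-- stated objective: alternative
-- what changed: The bottom-up flat reverse index loop over internal nodes is replaced by a recursive top-down build(node) that recurses into both children and then combines them, traversing the tree structurally instead of scanning indices.
import Mathlib
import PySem

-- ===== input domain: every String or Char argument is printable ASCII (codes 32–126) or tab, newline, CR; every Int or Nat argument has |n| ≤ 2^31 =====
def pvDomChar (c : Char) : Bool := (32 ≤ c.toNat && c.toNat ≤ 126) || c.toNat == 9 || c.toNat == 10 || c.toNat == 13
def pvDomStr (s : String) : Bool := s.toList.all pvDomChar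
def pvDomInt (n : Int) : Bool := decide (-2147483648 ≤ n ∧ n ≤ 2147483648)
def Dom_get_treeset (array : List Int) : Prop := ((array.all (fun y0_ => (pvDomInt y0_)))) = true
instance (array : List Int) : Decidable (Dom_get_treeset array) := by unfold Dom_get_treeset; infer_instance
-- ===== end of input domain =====

-- B replaces A's bottom-up reverse index loop over internal nodes by a top-down
-- recursive build; same output, different decomposition ("alternative", not faster).
-- (B's Python mutates a local list it created itself; neither version mutates the argument.)

-- ===== PORT A =====
-- while 2 ** degree_two < len(array): degree_two += 1
def pvDeg (n : Nat) (d : Nat) : Nat :=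
  if h : 2 ^ d < n then pvDeg n (d + 1) else d
termination_by n - 2 ^ d
decreasing_by
  have h2 : 2 ^ d < 2 ^ (d + 1) := Nat.pow_lt_pow_succ (by norm_num)
  omega

def get_treeset (array : List Int) : (List (Int × Int)) × Int :=
  let size : Nat := 2 ^ pvDeg array.length 0
  let tree0 : List (Int × Int) := List.replicate (size * 2 - 1) ((-1 : Int), (-1 : Int))
  -- for i in range(len(array)): tree_set[i + size - 1] = (array[i], i)   (i always in range)
  let tree1 := (List.range array.length).foldl
      (fun t i => t.set (i + size - 1) (array.getD i 0, (i : Int))) tree0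
  -- for j in range(size - 2, -1, -1): …   (indices 2j+1, 2j+2, j always in range, j ≥ 0)
  let tree2 := (PySem.List.pyRange ((size : Int) - 2) (-1) (-1)).foldl
      (fun t j =>
        let lc := PySem.List.pyGetD t (2 * j + 1) ((-1 : Int), (-1 : Int))
        let rc := PySem.List.pyGetD t (2 * j + 2) ((-1 : Int), (-1 : Int))
        if lc.1 > rc.1 then t.set j.toNat lc else t.set j.toNat rc) tree1
  (tree2, (size : Int))

-- ===== PORT B =====
-- def build(node): recurse into both children, then combine   (node always ≥ 0: Nat)
def pvBuild (size : Nat) (node : Nat) (t : List (Int × Int)) : List (Int × Int) :=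
  if h : size - 1 ≤ node then t
  else
    let t1 := pvBuild size (2 * node + 1) t
    let t2 := pvBuild size (2 * node + 2) t1
    let lc := t2.getD (2 * node + 1) ((-1 : Int), (-1 : Int))
    let rc := t2.getD (2 * node + 2) ((-1 : Int), (-1 : Int))
    if lc.1 > rc.1 then t2.set node lc else t2.set node rc
termination_by size - 1 - node
decreasing_by all_goals omega

def get_treeset_alt (array : List Int) : (List (Int × Int)) × Int :=
  let size : Nat := 2 ^ pvDeg array.length 0
  let tree0 : List (Int × Int) := List.replicate (size * 2 - 1) ((-1 : Int), (-1 : Int))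
  let tree1 := (List.range array.length).foldl
      (fun t i => t.set (i + size - 1) (array.getD i 0, (i : Int))) tree0
  (pvBuild size 0 tree1, (size : Int))

-- ===== PRECONDITION & SPEC =====
def Spec_get_treeset (array : List Int) (out : (List (Int × Int)) × Int) : Prop := out = get_treeset_alt array
instance (array : List Int) (out : (List (Int × Int)) × Int) : Decidable (Spec_get_treeset array out) := by unfold Spec_get_treeset; infer_instance

-- ===== CLAIM (what is proved, stated in full; the proofs are below) =====
def Claim_equal_get_treeset : Prop := ∀ (array : List Int), Dom_get_treeset array → Spec_get_treeset array (get_treeset array)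

-- ===== LEMMAS AND PROOFS =====

-- the final value a node of the tree must hold: leaf value at j ≥ size-1, max-combine below
def pvSpec (size : Nat) (t0 : List (Int × Int)) (j : Nat) : Int × Int :=
  if h : size - 1 ≤ j then t0.getD j ((-1 : Int), (-1 : Int))
  else
    let l := pvSpec size t0 (2 * j + 1)
    let r := pvSpec size t0 (2 * j + 2)
    if l.1 > r.1 then l else r
termination_by size - 1 - j
decreasing_by all_goals omega

-- one step of A's inner loop, over Nat indices
def pvStep (t : List (Int × Int)) (j : Nat) : List (Int × Int) :=
  let lc := t.getD (2 * j + 1) ((-1 : Int), (-1 : Int))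
  let rc := t.getD (2 * j + 2) ((-1 : Int), (-1 : Int))
  if lc.1 > rc.1 then t.set j lc else t.set j rc

-- A's loop, processing j = m-1, m-2, ..., 0
def pvQA : Nat → List (Int × Int) → List (Int × Int)
  | 0, t => t
  | m + 1, t => pvQA m (pvStep t m)

-- j lies in the subtree rooted at n (heap indexing, parent (j-1)/2)
def pvIsDesc (n : Nat) (j : Nat) : Bool :=
  if j = n then true else if j ≤ n then false else pvIsDesc n ((j - 1) / 2)
termination_by j
decreasing_by omega

theorem pv_getD_set (t : List (Int × Int)) (m j : Nat) (v d : Int × Int) :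
    (t.set m v).getD j d = if j = m ∧ m < t.length then v else t.getD j d := by
  simp only [List.getD_eq_getElem?_getD, List.getElem?_set]
  by_cases hj : j = m
  · subst hj
    by_cases hm : j < t.length
    · simp [hm]
    · simp [hm]
  · have hmj : m ≠ j := fun h => hj h.symm
    simp [hmj, hj]

theorem pv_foldl_eq_QA : ∀ (m : Nat) (t : List (Int × Int)),
    (PySem.List.pyRange ((m : Int) - 1) (-1) (-1)).foldl
      (fun t j =>
        let lc := PySem.List.pyGetD t (2 * j + 1) ((-1 : Int), (-1 : Int))
        let rc := PySem.List.pyGetD t (2 * j + 2) ((-1 : Int), (-1 : Int))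
        if lc.1 > rc.1 then t.set j.toNat lc else t.set j.toNat rc) t = pvQA m t := by
  intro m
  induction m with
  | zero =>
    intro t
    rw [PySem.List.pyRange_neg_one_eq_nil (by norm_num)]
    rfl
  | succ m ih =>
    intro t
    have hlt : (-1 : Int) < ((m + 1 : Nat) : Int) - 1 := by push_cast; omega
    rw [PySem.List.pyRange_neg_one_cons hlt, List.foldl_cons]
    have ha : ((m + 1 : Nat) : Int) - 1 = ((m : Nat) : Int) := by push_cast; ring
    have ha' : ((m + 1 : Nat) : Int) - 1 - 1 = ((m : Nat) : Int) - 1 := by push_cast; ring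
    rw [ha', ha, ih]
    have e1 : 2 * ((m : Nat) : Int) + 1 = ((2 * m + 1 : Nat) : Int) := by push_cast; ring
    have e2 : 2 * ((m : Nat) : Int) + 2 = ((2 * m + 2 : Nat) : Int) := by push_cast; ring
    show pvQA m _ = pvQA m (pvStep t m)
    congr 1
    simp only [e1, e2, PySem.List.pyGetD_natCast, Int.toNat_natCast, pvStep]

theorem pvQA_getD (size : Nat) (t0 : List (Int × Int)) :
    ∀ (m : Nat) (t : List (Int × Int)), m < size → t.length = 2 * size - 1 →
    (∀ j, m ≤ j → t.getD j ((-1 : Int), (-1 : Int)) = pvSpec size t0 j) →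
    ∀ j, (pvQA m t).getD j ((-1 : Int), (-1 : Int)) =
      if j < m then pvSpec size t0 j else t.getD j ((-1 : Int), (-1 : Int)) := by
  intro m
  induction m with
  | zero => intro t _ _ _ j; simp [pvQA]
  | succ m ih =>
    intro t hm hlen hpre j
    have hm' : m < size - 1 := by omega
    have hc1 : t.getD (2 * m + 1) ((-1 : Int), (-1 : Int)) = pvSpec size t0 (2 * m + 1) :=
      hpre _ (by omega)
    have hc2 : t.getD (2 * m + 2) ((-1 : Int), (-1 : Int)) = pvSpec size t0 (2 * m + 2) :=
      hpre _ (by omega)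
    have hspecm : pvSpec size t0 m =
        if (pvSpec size t0 (2 * m + 1)).1 > (pvSpec size t0 (2 * m + 2)).1
        then pvSpec size t0 (2 * m + 1) else pvSpec size t0 (2 * m + 2) := by
      rw [pvSpec, dif_neg (by omega)]
    have hstep : pvStep t m = t.set m (pvSpec size t0 m) := by
      simp only [pvStep, hc1, hc2, hspecm]
      split_ifs <;> rfl
    show (pvQA m (pvStep t m)).getD j _ = _
    rw [hstep]
    have hmlen : m < t.length := by omega
    have hpre' : ∀ k, m ≤ k →
        (t.set m (pvSpec size t0 m)).getD k ((-1 : Int), (-1 : Int)) = pvSpec size t0 k := by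
      intro k hk
      rw [pv_getD_set]
      by_cases hkm : k = m
      · subst hkm; simp [hmlen]
      · rw [if_neg (by tauto)]; exact hpre k (by omega)
    rw [ih _ (by omega) (by simp [hlen]) hpre' j, pv_getD_set]
    rcases Nat.lt_trichotomy j m with h | h | h
    · rw [if_pos h, if_pos (by omega)]
    · subst h
      rw [if_neg (by omega), if_pos ⟨rfl, hmlen⟩, if_pos (by omega)]
    · rw [if_neg (by omega), if_neg (by omega), if_neg (by omega)]

theorem pvQA_length : ∀ (m : Nat) (t : List (Int × Int)), (pvQA m t).length = t.length := by
  intro m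
  induction m with
  | zero => intro t; rfl
  | succ m ih =>
    intro t
    show (pvQA m (pvStep t m)).length = _
    rw [ih]
    simp only [pvStep]
    split <;> simp [List.length_set]

theorem pv_desc_ge : ∀ (j n : Nat), pvIsDesc n j = true → n ≤ j := by
  intro j
  induction j using Nat.strong_induction_on with
  | _ j ih =>
    intro n h
    rw [pvIsDesc] at h
    split_ifs at h with h1 h2
    · omega
    · have := ih ((j - 1) / 2) (by omega) n h
      omega

theorem pv_desc_children : ∀ (j n : Nat), j ≠ n →
    (pvIsDesc n j = true ↔ pvIsDesc (2 * n + 1) j = true ∨ pvIsDesc (2 * n + 2) j = true) := by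
  intro j
  induction j using Nat.strong_induction_on with
  | _ j ih =>
    intro n hne
    constructor
    · intro h
      rw [pvIsDesc, if_neg hne] at h
      split_ifs at h with h2
      by_cases hp : (j - 1) / 2 = n
      · have hcase : j = 2 * n + 1 ∨ j = 2 * n + 2 := by omega
        rcases hcase with h3 | h3
        · left; rw [h3, pvIsDesc]; simp
        · right; rw [h3, pvIsDesc]; simp
      · rcases (ih _ (by omega) n hp).1 h with h4 | h4
        · left
          have hge := pv_desc_ge _ _ h4
          rw [pvIsDesc, if_neg (by omega), if_neg (by omega)]
          exact h4
        · right
          have hge := pv_desc_ge _ _ h4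
          rw [pvIsDesc, if_neg (by omega), if_neg (by omega)]
          exact h4
    · intro h
      rcases h with h | h
      · by_cases hj : j = 2 * n + 1
        · subst hj
          rw [pvIsDesc, if_neg hne, if_neg (by omega), show (2 * n + 1 - 1) / 2 = n by omega,
            pvIsDesc]
          simp
        · rw [pvIsDesc, if_neg hj] at h
          split_ifs at h with h2
          have hge := pv_desc_ge _ _ h
          have hne' : (j - 1) / 2 ≠ n := by omega
          have hdn := (ih _ (by omega) n hne').2 (Or.inl h)
          rw [pvIsDesc, if_neg hne, if_neg (by omega)]
          exact hdn
      · by_cases hj : j = 2 * n + 2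
        · subst hj
          rw [pvIsDesc, if_neg hne, if_neg (by omega), show (2 * n + 2 - 1) / 2 = n by omega,
            pvIsDesc]
          simp
        · rw [pvIsDesc, if_neg hj] at h
          split_ifs at h with h2
          have hge := pv_desc_ge _ _ h
          have hne' : (j - 1) / 2 ≠ n := by omega
          have hdn := (ih _ (by omega) n hne').2 (Or.inr h)
          rw [pvIsDesc, if_neg hne, if_neg (by omega)]
          exact hdn

theorem pv_desc_root : ∀ (j : Nat), pvIsDesc 0 j = true := by
  intro j
  induction j using Nat.strong_induction_on with
  | _ j ih =>
    rw [pvIsDesc]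
    by_cases h : j = 0
    · simp [h]
    · rw [if_neg h, if_neg (by omega)]
      exact ih _ (by omega)

theorem pvBuild_len (size : Nat) : ∀ (k node : Nat), size - 1 - node ≤ k →
    ∀ (t : List (Int × Int)), (pvBuild size node t).length = t.length := by
  intro k
  induction k with
  | zero => intro node hk t; rw [pvBuild, dif_pos (by omega)]
  | succ k ih =>
    intro node hk t
    rw [pvBuild]
    split_ifs with h
    · rfl
    · dsimp only
      split_ifs <;>
        simp [List.length_set, ih (2 * node + 2) (by omega), ih (2 * node + 1) (by omega)]

theorem pvBuild_length (size node : Nat) (t : List (Int × Int)) :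
    (pvBuild size node t).length = t.length :=
  pvBuild_len size (size - 1 - node) node le_rfl t

theorem pvBuild_getD (size : Nat) (t0 : List (Int × Int)) :
    ∀ (k node : Nat), size - 1 - node ≤ k →
    ∀ (t : List (Int × Int)), t.length = 2 * size - 1 →
    (∀ j, size - 1 ≤ j → t.getD j ((-1 : Int), (-1 : Int)) = pvSpec size t0 j) →
    ∀ j, (pvBuild size node t).getD j ((-1 : Int), (-1 : Int)) =
      if pvIsDesc node j = true ∧ j < size - 1 then pvSpec size t0 j
      else t.getD j ((-1 : Int), (-1 : Int)) := by
  intro k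
  induction k with
  | zero =>
    intro node hk t hlen hpre j
    rw [pvBuild, dif_pos (by omega), if_neg]
    rintro ⟨h1, h2⟩
    have := pv_desc_ge _ _ h1
    omega
  | succ k ih =>
    intro node hk t hlen hpre j
    by_cases h : size - 1 ≤ node
    · rw [pvBuild, dif_pos h, if_neg]
      rintro ⟨h1, h2⟩
      have := pv_desc_ge _ _ h1
      omega
    · rw [pvBuild, dif_neg h]
      show (if ((pvBuild size (2 * node + 2) (pvBuild size (2 * node + 1) t)).getD
              (2 * node + 1) ((-1 : Int), (-1 : Int))).1 >
            ((pvBuild size (2 * node + 2) (pvBuild size (2 * node + 1) t)).getD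
              (2 * node + 2) ((-1 : Int), (-1 : Int))).1
          then (pvBuild size (2 * node + 2) (pvBuild size (2 * node + 1) t)).set node
            ((pvBuild size (2 * node + 2) (pvBuild size (2 * node + 1) t)).getD
              (2 * node + 1) ((-1 : Int), (-1 : Int)))
          else (pvBuild size (2 * node + 2) (pvBuild size (2 * node + 1) t)).set node
            ((pvBuild size (2 * node + 2) (pvBuild size (2 * node + 1) t)).getD
              (2 * node + 2) ((-1 : Int), (-1 : Int)))).getD j ((-1 : Int), (-1 : Int)) = _
      set t1 := pvBuild size (2 * node + 1) t with ht1
      set t2 := pvBuild size (2 * node + 2) t1 with ht2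
      have hlen1 : t1.length = 2 * size - 1 := by rw [ht1, pvBuild_length, hlen]
      have ih1 := ih (2 * node + 1) (by omega) t hlen hpre
      have hpre1 : ∀ j, size - 1 ≤ j → t1.getD j ((-1 : Int), (-1 : Int)) = pvSpec size t0 j := by
        intro m hm
        rw [ht1, ih1 m, if_neg (by rintro ⟨_, h2⟩; omega)]
        exact hpre m hm
      have ih2 := ih (2 * node + 2) (by omega) t1 hlen1 hpre1
      have hlen2 : t2.length = 2 * size - 1 := by rw [ht2, pvBuild_length, hlen1]
      have hself1 : pvIsDesc (2 * node + 1) (2 * node + 1) = true := by rw [pvIsDesc]; simp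
      have hself2 : pvIsDesc (2 * node + 2) (2 * node + 2) = true := by rw [pvIsDesc]; simp
      have hlc : t2.getD (2 * node + 1) ((-1 : Int), (-1 : Int)) = pvSpec size t0 (2 * node + 1) := by
        rw [ht2, ih2 (2 * node + 1)]
        by_cases hin : 2 * node + 1 < size - 1
        · rw [if_neg, ht1, ih1 (2 * node + 1), if_pos ⟨hself1, hin⟩]
          rintro ⟨hd, _⟩
          rw [pvIsDesc, if_neg (by omega), if_pos (by omega)] at hd
          exact absurd hd (by simp)
        · rw [if_neg (by rintro ⟨_, h2⟩; omega)]
          exact hpre1 _ (by omega)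
      have hrc : t2.getD (2 * node + 2) ((-1 : Int), (-1 : Int)) = pvSpec size t0 (2 * node + 2) := by
        rw [ht2, ih2 (2 * node + 2)]
        by_cases hin : 2 * node + 2 < size - 1
        · rw [if_pos ⟨hself2, hin⟩]
        · rw [if_neg (by rintro ⟨_, h2⟩; omega)]
          exact hpre1 _ (by omega)
      have hspecn : pvSpec size t0 node =
          if (pvSpec size t0 (2 * node + 1)).1 > (pvSpec size t0 (2 * node + 2)).1
          then pvSpec size t0 (2 * node + 1) else pvSpec size t0 (2 * node + 2) := by
        rw [pvSpec, dif_neg h]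
      have hset : (if (t2.getD (2 * node + 1) ((-1 : Int), (-1 : Int))).1 >
              (t2.getD (2 * node + 2) ((-1 : Int), (-1 : Int))).1
          then t2.set node (t2.getD (2 * node + 1) ((-1 : Int), (-1 : Int)))
          else t2.set node (t2.getD (2 * node + 2) ((-1 : Int), (-1 : Int))))
          = t2.set node (pvSpec size t0 node) := by
        rw [hlc, hrc, hspecn]
        split_ifs <;> rfl
      rw [hset, pv_getD_set]
      by_cases hj : j = node
      · subst hj
        rw [if_pos ⟨rfl, by omega⟩, if_pos ⟨by rw [pvIsDesc]; simp, by omega⟩]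
      · rw [if_neg (by tauto), ht2, ih2 j]
        by_cases h2d : pvIsDesc (2 * node + 2) j = true ∧ j < size - 1
        · rw [if_pos h2d, if_pos ⟨(pv_desc_children j node hj).2 (Or.inr h2d.1), h2d.2⟩]
        · rw [if_neg h2d, ht1, ih1 j]
          by_cases h1d : pvIsDesc (2 * node + 1) j = true ∧ j < size - 1
          · rw [if_pos h1d, if_pos ⟨(pv_desc_children j node hj).2 (Or.inl h1d.1), h1d.2⟩]
          · rw [if_neg h1d, if_neg]
            rintro ⟨hd, hlt⟩
            rcases (pv_desc_children j node hj).1 hd with h4 | h4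
            · exact h1d ⟨h4, hlt⟩
            · exact h2d ⟨h4, hlt⟩

-- ===== VERDICT (by name: the statement is the Claim_ definition above) =====
theorem get_treeset_spec : Claim_equal_get_treeset := by
  intro array _
  unfold Spec_get_treeset get_treeset get_treeset_alt
  dsimp only
  set s := 2 ^ pvDeg array.length 0 with hs
  have hs1 : 1 ≤ s := Nat.one_le_two_pow
  set t1 := (List.range array.length).foldl
      (fun t i => t.set (i + s - 1) (array.getD i 0, (i : Int)))
      (List.replicate (s * 2 - 1) ((-1 : Int), (-1 : Int))) with ht1
  have hlen1 : t1.length = 2 * s - 1 := by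
    rw [ht1]
    have hh : ∀ (l : List Nat) (t : List (Int × Int)),
        (l.foldl (fun t i => t.set (i + s - 1) (array.getD i 0, (i : Int))) t).length
          = t.length := by
      intro l
      induction l with
      | nil => intro t; rfl
      | cons a l ihl => intro t; rw [List.foldl_cons, ihl]; simp [List.length_set]
    rw [hh, List.length_replicate]
    omega
  have hpre0 : ∀ j, s - 1 ≤ j → t1.getD j ((-1 : Int), (-1 : Int)) = pvSpec s t1 j := by
    intro j hj
    rw [pvSpec, dif_pos hj]
  have hcast : ((s : Int) - 2) = ((s - 1 : Nat) : Int) - 1 := by omega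
  rw [hcast, pv_foldl_eq_QA (s - 1) t1]
  simp only [Prod.mk.injEq]
  refine ⟨?_, by first | rfl | trivial⟩
  apply List.ext_getElem
  · rw [pvQA_length, pvBuild_length]
  · intro i h1 h2
    rw [show (pvQA (s - 1) t1)[i] = (pvQA (s - 1) t1).getD i ((-1 : Int), (-1 : Int)) from
        (List.getD_eq_getElem _ _ h1).symm,
      show (pvBuild s 0 t1)[i] = (pvBuild s 0 t1).getD i ((-1 : Int), (-1 : Int)) from
        (List.getD_eq_getElem _ _ h2).symm,
      pvQA_getD s t1 (s - 1) t1 (by omega) hlen1 hpre0 i,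
      pvBuild_getD s t1 s 0 (by omega) t1 hlen1 hpre0 i,
      pv_desc_root i]
    simp
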